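-- pv_equiv track=rewrite | github.com/Abhishek-1804/Leetcode | 1180-count-substrings-with-only-one-distinct-letter/1180-count-substrings-with-only-one-distinct-letter.py | countLetters
-- ===== SOURCE A (Python) =====
-- def countLetters(s: str) -> int:
--
--     total = 0
--     seen = set()
--     n = len(s)
--
--     for i in range(n):
--         seen.add(s[i])
--         for j in range(i, n):
--             if s[j] in seen:
--                 total += 1
--             else:
--                 break
--         seen.pop()
--
--     return total
-- ===== SOURCE B (Python) =====
-- def countLetters(s: str) -> int:
--     # one pass: each position contributes the length of the equal-char run ending there
--     total = 0
--     run = 0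
--     prev = None
--     for ch in s:
--         run = run + 1 if ch == prev else 1
--         prev = ch
--         total += run
--     return total
-- ===== Notes on version B (the rewrite author's own statement) =====
-- stated objective: faster
-- what changed: replaces the O(n^2) nested index loops with a single left-to-right pass that tracks the current run length and adds it at each position
import Mathlib
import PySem

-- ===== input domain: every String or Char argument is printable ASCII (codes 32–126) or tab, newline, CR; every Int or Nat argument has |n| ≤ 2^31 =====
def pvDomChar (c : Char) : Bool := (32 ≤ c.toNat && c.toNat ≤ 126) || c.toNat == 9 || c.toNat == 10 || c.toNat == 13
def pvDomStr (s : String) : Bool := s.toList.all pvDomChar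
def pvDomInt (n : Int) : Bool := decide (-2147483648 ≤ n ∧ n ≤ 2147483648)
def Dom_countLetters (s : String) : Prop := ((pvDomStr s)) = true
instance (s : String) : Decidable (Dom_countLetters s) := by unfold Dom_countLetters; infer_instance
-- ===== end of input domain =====

-- B replaces A's O(n^2) nested index loops by one left-to-right pass adding the current run length.

-- ===== PORT A =====
-- inner 'for j in range(i, n)' with break; s[j] via getD, exact since j < n = length
def pvInnerA (l : List Char) (seen : PySem.Set Char) (j n : Nat) (total : Int) : Int :=
  if j < n then
    if PySem.Set.contains seen (l.getD j ' ') then pvInnerA l seen (j+1) n (total+1) else total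
  else total
termination_by n - j

-- outer 'for i in range(n)'; 'seen.pop()' removes the unique element (seen always has exactly
-- one element there), ported as dropping the first element of the set's list
def pvOuterA (l : List Char) (i n : Nat) (total : Int) (seen : PySem.Set Char) : Int :=
  if i < n then
    let seen' := PySem.Set.add seen (l.getD i ' ')
    let total' := pvInnerA l seen' i n total
    pvOuterA l (i+1) n total' (seen'.drop 1)
  else total
termination_by n - i

def countLetters (s : String) : Int :=
  pvOuterA s.toList 0 s.toList.length 0 PySem.Set.empty

-- ===== PORT B =====
-- state (total, run, prev); one step of B's for loop
def pvStepB (st : Int × Int × Option Char) (ch : Char) : Int × Int × Option Char :=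
  let run : Int := if st.2.2 == some ch then st.2.1 + 1 else 1
  (st.1 + run, run, some ch)

def countLetters_alt (s : String) : Int :=
  (s.toList.foldl pvStepB (0, 0, none)).1

-- ===== PRECONDITION & SPEC =====
def Spec_countLetters (s : String) (out : Int) : Prop := out = countLetters_alt s
instance (s : String) (out : Int) : Decidable (Spec_countLetters s out) := by unfold Spec_countLetters; infer_instance

-- ===== CLAIM (what is proved, stated in full; the proofs are below) =====
def Claim_equal_countLetters : Prop := ∀ (s : String), Dom_countLetters s → Spec_countLetters s (countLetters s)

-- ===== LEMMAS AND PROOFS =====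

-- length of the prefix of t consisting of copies of c
def pvPr (c : Char) : List Char → Int
  | [] => 0
  | d :: t => if d = c then 1 + pvPr c t else 0

-- the common value: sum over suffixes of (1 + run length of the head into the tail)
def pvS : List Char → Int
  | [] => 0
  | c :: t => 1 + pvPr c t + pvS t

theorem pvInnerA_eq (k : Nat) : ∀ (l : List Char) (c : Char) (j : Nat) (total : Int),
    l.length - j ≤ k → pvInnerA l [c] j l.length total = total + pvPr c (l.drop j) := by
  induction k with
  | zero =>
    intro l c j total h
    have hj : l.length ≤ j := by omega
    rw [pvInnerA, if_neg (by omega), List.drop_eq_nil_of_le hj, pvPr]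
    omega
  | succ k ih =>
    intro l c j total h
    by_cases hj : j < l.length
    · have hd : l.drop j = l[j] :: l.drop (j + 1) := List.drop_eq_getElem_cons hj
      have hg : l.getD j ' ' = l[j] := by
        simp [List.getD, List.getElem?_eq_getElem hj]
      rw [pvInnerA, if_pos hj, hg, hd, pvPr]
      by_cases hcc : l[j] = c
      · rw [if_pos (by simp [hcc]), ih l c (j + 1) (total + 1) (by omega), if_pos hcc]
        ring
      · rw [if_neg (by simp [hcc]), if_neg hcc]
        ring
    · rw [pvInnerA, if_neg hj, List.drop_eq_nil_of_le (by omega), pvPr]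
      omega

theorem pvOuterA_eq (k : Nat) : ∀ (l : List Char) (i : Nat) (total : Int),
    l.length - i ≤ k → pvOuterA l i l.length total PySem.Set.empty = total + pvS (l.drop i) := by
  induction k with
  | zero =>
    intro l i total h
    have hi : l.length ≤ i := by omega
    rw [pvOuterA, if_neg (by omega), List.drop_eq_nil_of_le hi, pvS]
    omega
  | succ k ih =>
    intro l i total h
    by_cases hi : i < l.length
    · have hd : l.drop i = l[i] :: l.drop (i + 1) := List.drop_eq_getElem_cons hi
      have hg : l.getD i ' ' = l[i] := by
        simp [List.getD, List.getElem?_eq_getElem hi]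
      rw [pvOuterA, if_pos hi]
      have hadd : PySem.Set.add PySem.Set.empty (l.getD i ' ') = [l[i]] := by
        rw [hg]; rfl
      simp only [hadd]
      rw [pvInnerA_eq (l.length - i) l l[i] i total (by omega)]
      have hdrop1 : ([l[i]] : List Char).drop 1 = PySem.Set.empty := rfl
      rw [hdrop1, ih l (i + 1) _ (by omega), hd, pvS, pvPr, if_pos rfl]
      ring
    · rw [pvOuterA, if_neg hi, List.drop_eq_nil_of_le (by omega), pvS]
      omega

theorem pvFoldB_some (l : List Char) : ∀ (c : Char) (k total : Int),
    (l.foldl pvStepB (total, k, some c)).1 = total + pvS l + k * pvPr c l := by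
  induction l with
  | nil => intro c k total; simp [pvS, pvPr]
  | cons d t ih =>
    intro c k total
    by_cases hdc : c = d
    · subst hdc
      simp only [List.foldl_cons, pvStepB, beq_self_eq_true, if_pos]
      rw [ih c (k + 1) (total + (k + 1)), pvS, pvPr, if_pos rfl]
      ring
    · have : ((some c : Option Char) == some d) = false := by
        simp [hdc]
      simp only [List.foldl_cons, pvStepB, this, if_neg Bool.false_ne_true]
      rw [ih d 1 (total + 1), pvS, pvPr, if_neg (fun h => hdc h.symm)]
      ring

theorem pvFoldB_eq (l : List Char) : (l.foldl pvStepB (0, 0, none)).1 = pvS l := by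
  cases l with
  | nil => simp [pvS]
  | cons d t =>
    simp only [List.foldl_cons, pvStepB]
    have : ((none : Option Char) == some d) = false := rfl
    rw [this, if_neg Bool.false_ne_true]
    rw [pvFoldB_some t d 1 (0 + 1), pvS]
    ring

-- ===== VERDICT (by name: the statement is the Claim_ definition above) =====
theorem countLetters_spec : Claim_equal_countLetters := by
  intro s _
  unfold Spec_countLetters countLetters countLetters_alt
  rw [pvOuterA_eq s.toList.length s.toList 0 0 (by omega), List.drop_zero, pvFoldB_eq]
  ring
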